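-- pv_equiv track=rewrite | github.com/ThomasDavis4757/NBAFantasyDraftBoard | NBA_Fantasy_Prediction/Notebooks/PythonStreamlit/StreamletVSC.py | mark_as_good
-- ===== SOURCE A (Python) =====
-- def mark_as_good(player_positions, positions_equation, positions):
--     if positions_equation == 'OR':
--         for i in player_positions:
--             if i in positions:
--                 return True
--             else:
--                 continue
--         return False
--
--     elif positions_equation == 'AND':
--         num_positions = len(positions)
--         matching_positions = 0
--         for i in player_positions:
--             if i in positions:
--                 matching_positions += 1
--         if num_positions == matching_positions:
--             return True
--         else:
--             return False
--
--     elif positions_equation == 'NOT':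
--         for i in player_positions:
--             if i in positions:
--                 return False
--             else:
--                 continue
--         return True
-- ===== SOURCE B (Python) =====
-- def mark_as_good(player_positions, positions_equation, positions):
--     position_set = set(positions)
--     matches = sum(1 for p in player_positions if p in position_set)
--     if positions_equation == 'OR':
--         return matches > 0
--     if positions_equation == 'AND':
--         return matches == len(positions)
--     if positions_equation == 'NOT':
--         return matches == 0
-- ===== Notes on version B (the rewrite author's own statement) =====
-- stated objective: simpler
-- what changed: Replaces A's three separate early-returning scans with a single match-count pass (membership via a set built once) followed by one comparison dispatched on the equation string.
-- outside the precondition, e.g. on mark_as_good(['PG'], 'XOR', ['PG']): A returns None, B returns None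
import Mathlib
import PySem

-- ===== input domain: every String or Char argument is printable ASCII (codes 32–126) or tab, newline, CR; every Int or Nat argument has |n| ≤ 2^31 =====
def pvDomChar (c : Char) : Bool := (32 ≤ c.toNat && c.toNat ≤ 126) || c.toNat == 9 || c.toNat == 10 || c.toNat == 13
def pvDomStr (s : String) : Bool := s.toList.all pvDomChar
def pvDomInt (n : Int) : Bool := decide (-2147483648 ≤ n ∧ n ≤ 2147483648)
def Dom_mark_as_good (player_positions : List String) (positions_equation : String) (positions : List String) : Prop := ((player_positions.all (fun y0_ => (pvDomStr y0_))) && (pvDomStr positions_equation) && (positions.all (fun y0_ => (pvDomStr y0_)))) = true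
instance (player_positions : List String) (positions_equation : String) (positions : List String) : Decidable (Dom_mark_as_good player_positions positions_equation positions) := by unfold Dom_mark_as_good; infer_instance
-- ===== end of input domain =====

-- B replaces A's three separate early-returning scans with one match-count pass plus a
-- comparison dispatched on the equation string (objective: simpler).


-- ===== PORT A =====
-- A's 'OR' loop: return True at the first element found in positions, else False at the end.
def markOrLoopA : List String → List String → Bool
  | [], _ => false
  | i :: rest, positions => if positions.contains i then true else markOrLoopA rest positions

-- A's 'AND' loop: running counter of elements of player_positions found in positions.
def markAndLoopA : List String → List String → Int → Int
  | [], _, acc => acc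
  | i :: rest, positions, acc =>
      if positions.contains i then markAndLoopA rest positions (acc + 1)
      else markAndLoopA rest positions acc

-- A's 'NOT' loop: return False at the first element found in positions, else True at the end.
def markNotLoopA : List String → List String → Bool
  | [], _ => true
  | i :: rest, positions => if positions.contains i then false else markNotLoopA rest positions

def mark_as_good (player_positions : List String) (positions_equation : String) (positions : List String) : Bool :=
  if positions_equation = "OR" then
    markOrLoopA player_positions positions
  else if positions_equation = "AND" then
    if (positions.length : Int) = markAndLoopA player_positions positions 0 then true else false
  else if positions_equation = "NOT" then
    markNotLoopA player_positions positions
  else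
    false  -- Python A returns None here; excluded by Pre_mark_as_good

-- ===== PORT B =====
def mark_as_good_alt (player_positions : List String) (positions_equation : String) (positions : List String) : Bool :=
  let posSet : PySem.Set String := PySem.Set.ofList positions
  let numMatches : Int := player_positions.foldl (fun acc p => if posSet.contains p then acc + 1 else acc) 0
  if positions_equation = "OR" then decide (numMatches > 0)
  else if positions_equation = "AND" then decide (numMatches = (positions.length : Int))
  else if positions_equation = "NOT" then decide (numMatches = 0)
  else false  -- Python B returns None here; excluded by Pre_mark_as_good

-- ===== PRECONDITION & SPEC =====
-- Pre_ excludes unrecognized equation strings: there Python A (and B) falls through and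
-- returns None, which is not a Bool.
def Pre_mark_as_good (player_positions : List String) (positions_equation : String) (positions : List String) : Prop :=
  positions_equation = "OR" ∨ positions_equation = "AND" ∨ positions_equation = "NOT"
instance (player_positions : List String) (positions_equation : String) (positions : List String) : Decidable (Pre_mark_as_good player_positions positions_equation positions) := by unfold Pre_mark_as_good; infer_instance

def pvWitness_mark_as_good : List String × String × List String := (["PG", "C"], "AND", ["PG"])

def Spec_mark_as_good (player_positions : List String) (positions_equation : String) (positions : List String) (out : Bool) : Prop := out = mark_as_good_alt player_positions positions_equation positions
instance (player_positions : List String) (positions_equation : String) (positions : List String) (out : Bool) : Decidable (Spec_mark_as_good player_positions positions_equation positions out) := by unfold Spec_mark_as_good; infer_instance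

-- ===== CLAIM (what is proved, stated in full; the proofs are below) =====
def Claim_equal_mark_as_good : Prop := ∀ (player_positions : List String) (positions_equation : String) (positions : List String), Dom_mark_as_good player_positions positions_equation positions → Pre_mark_as_good player_positions positions_equation positions → Spec_mark_as_good player_positions positions_equation positions (mark_as_good player_positions positions_equation positions)

-- ===== LEMMAS AND PROOFS =====

-- B's single counting fold.
def bCount (player_positions positions : List String) : Int :=
  player_positions.foldl (fun acc p => if positions.contains p then acc + 1 else acc) 0

lemma bCount_shift (positions pp : List String) (acc : Int) :
    pp.foldl (fun acc p => if positions.contains p then acc + 1 else acc) acc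
      = acc + bCount pp positions := by
  induction pp generalizing acc with
  | nil => simp [bCount]
  | cons i rest ih =>
    simp only [bCount, List.foldl_cons] at *
    split_ifs with h
    · rw [ih, ih (0 + 1)]; ring
    · rw [ih, ih 0]

lemma bCount_cons (i : String) (rest positions : List String) :
    bCount (i :: rest) positions =
      (if positions.contains i then bCount rest positions + 1 else bCount rest positions) := by
  simp only [bCount, List.foldl_cons]
  split_ifs with h <;> (rw [bCount_shift]; (try rw [bCount_shift]); (try omega))

lemma bCount_nonneg (pp positions : List String) : 0 ≤ bCount pp positions := by
  induction pp with
  | nil => simp [bCount]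
  | cons i rest ih => rw [bCount_cons]; split_ifs <;> omega

lemma orLoop_eq (pp positions : List String) :
    markOrLoopA pp positions = decide (bCount pp positions > 0) := by
  induction pp with
  | nil => simp [markOrLoopA, bCount]
  | cons i rest ih =>
    rw [markOrLoopA, bCount_cons]
    have := bCount_nonneg rest positions
    split_ifs with h
    · simp; omega
    · rw [ih]

lemma notLoop_eq (pp positions : List String) :
    markNotLoopA pp positions = decide (bCount pp positions = 0) := by
  induction pp with
  | nil => simp [markNotLoopA, bCount]
  | cons i rest ih =>
    rw [markNotLoopA, bCount_cons]
    have := bCount_nonneg rest positions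
    split_ifs with h
    · simp; omega
    · rw [ih]

lemma andLoop_eq (pp positions : List String) (acc : Int) :
    markAndLoopA pp positions acc = acc + bCount pp positions := by
  induction pp generalizing acc with
  | nil => simp [markAndLoopA, bCount]
  | cons i rest ih =>
    rw [markAndLoopA, bCount_cons]
    split_ifs with h
    · rw [ih]; ring
    · rw [ih]

-- ===== VERDICT (by name: the statement is the Claim_ definition above) =====
lemma contains_ofList (positions : List String) (p : String) :
    (PySem.Set.ofList positions).contains p = positions.contains p := by
  by_cases h : p ∈ positions <;>
    simp [List.contains_iff_mem, PySem.Set.mem_ofList, h]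

lemma if_eq_decide_symm (a b : Int) : (if a = b then true else false) = decide (b = a) := by
  by_cases h : a = b
  · simp [h]
  · simp [h, show ¬ b = a from fun hh => h hh.symm]

theorem mark_as_good_spec : Claim_equal_mark_as_good := by
  intro pp eq pos _ hpre
  unfold Spec_mark_as_good mark_as_good mark_as_good_alt
  simp only [contains_ofList]
  rcases hpre with h | h | h <;> subst h
  · simp [orLoop_eq, bCount]
  · simp only [String.reduceEq, if_false, if_true]
    rw [andLoop_eq, zero_add,
      show (pp.foldl (fun acc p => if pos.contains p then acc + 1 else acc) 0) = bCount pp pos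
        from rfl, if_eq_decide_symm]
  · simp [notLoop_eq, bCount]
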